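-- pv_equiv track=rewrite | github.com/GuilhermeGonSoares/Beecrowd-Solutions | Problemas-Iniciantes/beecrowd2724.py | verifica_perigo
-- ===== SOURCE A (Python) =====
-- def verifica_perigo(s_maior, s_menor, alfabeto, numero):
--     for i in range(len(s_maior)):
--         if s_maior[i] == s_menor[0]:
--             contador = 0
--             j = 0
--             while (i+j <= len(s_maior) - 1) and j <= len(s_menor) - 1:
--                 if s_maior[i+j] == s_menor[j]:
--                     contador += 1
--                 j += 1
--             if contador == len(s_menor):
--                 if i+j == len(s_maior):
--                     return True
--                 else:
--                     if s_maior[i+j] not in alfabeto and s_maior[i+j] not in numero: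
--                         return True
--     return False
-- ===== SOURCE B (Python) =====
-- def verifica_perigo(s_maior, s_menor, alfabeto, numero):
--     m = len(s_menor)
--     ends = [p for p, c in enumerate(s_maior) if c not in alfabeto and c not in numero]
--     ends.append(len(s_maior))
--     return any(p >= m and s_maior[p - m:p] == s_menor for p in ends)
-- ===== Notes on version B (the rewrite author's own statement) =====
-- stated objective: alternative
-- what changed: Instead of scanning every start position and verifying the character after the match, B inverts the search: it first collects the boundary positions (characters in neither alphabet, plus end-of-string) in one pass, then checks whether the pattern ends exactly at one of those boundaries via a backwards slice comparison.
-- outside the precondition, e.g. on verifica_perigo('', '', 'abc', '123'): A returns False, B returns True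
import Mathlib
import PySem

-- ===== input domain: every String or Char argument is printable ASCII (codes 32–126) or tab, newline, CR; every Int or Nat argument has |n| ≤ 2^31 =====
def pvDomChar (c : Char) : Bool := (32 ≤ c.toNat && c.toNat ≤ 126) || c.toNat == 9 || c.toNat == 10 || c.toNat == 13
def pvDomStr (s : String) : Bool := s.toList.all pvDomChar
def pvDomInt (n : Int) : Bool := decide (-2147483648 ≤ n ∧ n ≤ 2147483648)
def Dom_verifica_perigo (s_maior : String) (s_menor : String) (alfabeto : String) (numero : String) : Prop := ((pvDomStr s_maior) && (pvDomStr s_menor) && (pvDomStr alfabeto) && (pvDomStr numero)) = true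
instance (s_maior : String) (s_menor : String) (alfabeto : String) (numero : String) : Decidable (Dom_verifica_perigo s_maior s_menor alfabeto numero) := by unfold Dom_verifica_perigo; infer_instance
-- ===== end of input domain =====

-- B inverts A's search direction: instead of scanning every start position and checking the
-- character after a match, it collects the boundary positions (characters in neither alphabet,
-- plus end-of-string) in one pass and checks whether the pattern ends at one of them by a
-- backwards slice comparison (objective: alternative algorithm); equivalence is claimed for
-- non-empty s_menor (see Pre_ below).

-- ===== PORT A =====
-- inner 'while' of A: walks j across the window, counting position-wise character matches
def pvWhileA (L M : List Char) (i : Nat) (j : Nat) (c : Nat) : Nat × Nat :=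
  if h : i + j + 1 ≤ L.length ∧ j + 1 ≤ M.length then
    pvWhileA L M i (j + 1) (if L.getD (i + j) ' ' == M.getD j ' ' then c + 1 else c)
  else (c, j)
termination_by M.length - j
decreasing_by omega

-- outer 'for i in range(len(s_maior))' of A, with its early returns
def pvLoopA (L M A N : List Char) (i : Nat) : Bool :=
  if _h : i < L.length then
    if L.getD i ' ' == M.getD 0 ' ' then
      let p := pvWhileA L M i 0 0
      if p.1 == M.length then
        if i + p.2 == L.length then true
        else if !(A.contains (L.getD (i + p.2) ' ')) && !(N.contains (L.getD (i + p.2) ' ')) then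
          true
        else pvLoopA L M A N (i + 1)
      else pvLoopA L M A N (i + 1)
    else pvLoopA L M A N (i + 1)
  else false
termination_by L.length - i
decreasing_by all_goals omega

def verifica_perigo (s_maior : String) (s_menor : String) (alfabeto : String) (numero : String) : Bool :=
  pvLoopA s_maior.toList s_menor.toList alfabeto.toList numero.toList 0

-- ===== PORT B =====
def verifica_perigo_alt (s_maior : String) (s_menor : String) (alfabeto : String) (numero : String) : Bool :=
  let L := s_maior.toList
  let M := s_menor.toList
  let A := alfabeto.toList
  let N := numero.toList
  let m := M.length
  -- stage 1: boundary positions = [p for p, c in enumerate(s_maior) if c not in alfabeto and c not in numero] + [len(s_maior)]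
  let ends : List Int :=
    (PySem.List.enumerate L 0).filterMap
      (fun pc => if !(A.contains pc.2) && !(N.contains pc.2) then some pc.1 else none)
    ++ [(L.length : Int)]
  -- stage 2: any(p >= m and s_maior[p - m:p] == s_menor for p in ends)
  ends.any fun p =>
    decide ((m : Int) ≤ p) && decide (PySem.List.slice L (some (p - (m : Int))) (some p) = M)

-- ===== PRECONDITION & SPEC =====
-- Pre_ excludes empty s_menor: there A raises IndexError on s_menor[0] whenever s_maior is
-- non-empty, and on s_maior = '' it returns False only because its loop never runs — a corner
-- (empty pattern) where B's 'empty string matches everywhere' answer True is equally defensible.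
def Pre_verifica_perigo (s_maior : String) (s_menor : String) (alfabeto : String) (numero : String) : Prop := s_menor ≠ ""
instance (s_maior : String) (s_menor : String) (alfabeto : String) (numero : String) : Decidable (Pre_verifica_perigo s_maior s_menor alfabeto numero) := by unfold Pre_verifica_perigo; infer_instance

def pvWitness_verifica_perigo : String × String × String × String := ("ab.cd", "ab", "abcdefgh", "0123")

def Spec_verifica_perigo (s_maior : String) (s_menor : String) (alfabeto : String) (numero : String) (out : Bool) : Prop := out = verifica_perigo_alt s_maior s_menor alfabeto numero
instance (s_maior : String) (s_menor : String) (alfabeto : String) (numero : String) (out : Bool) : Decidable (Spec_verifica_perigo s_maior s_menor alfabeto numero out) := by unfold Spec_verifica_perigo; infer_instance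

-- ===== CLAIM (what is proved, stated in full; the proofs are below) =====
def Claim_equal_verifica_perigo : Prop := ∀ (s_maior : String) (s_menor : String) (alfabeto : String) (numero : String), Dom_verifica_perigo s_maior s_menor alfabeto numero → Pre_verifica_perigo s_maior s_menor alfabeto numero → Spec_verifica_perigo s_maior s_menor alfabeto numero (verifica_perigo s_maior s_menor alfabeto numero)


-- ===== LEMMAS AND PROOFS =====

-- "position k of L is a dangerous match": s_menor matches at k and the character after the
-- match (if any) is in neither alphabet. Both programs decide ∃ k < |L|, pvOk k.
def pvOk (L M A N : List Char) (k : Nat) : Bool :=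
  decide (M <+: L.drop k) &&
    (decide (k + M.length = L.length) ||
      (!(A.contains (L.getD (k + M.length) ' ')) && !(N.contains (L.getD (k + M.length) ' '))))

lemma pvWhileA_spec (L M : List Char) (i : Nat) :
    ∀ j c, j ≤ min M.length (L.length - i) →
      pvWhileA L M i j c =
        (c + (List.range' j (min M.length (L.length - i) - j)).countP
              (fun t => L.getD (i + t) ' ' == M.getD t ' '),
         min M.length (L.length - i)) := by
  set J := min M.length (L.length - i) with hJ
  intro j
  induction hd : J - j generalizing j with
  | zero =>
    intro c hj
    have hj' : j = J := by omega
    rw [pvWhileA]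
    rw [dif_neg (by omega)]
    simp [hj']
  | succ d ih =>
    intro c hj
    have hlt : j < J := by omega
    rw [pvWhileA]
    rw [dif_pos (by omega)]
    rw [ih (j+1) (by omega) _ (by omega)]
    rw [List.range'_succ, List.countP_cons]
    split_ifs with h
    · simp; omega
    · simp

lemma pvPrefix_char (L M : List Char) (i : Nat) (hi : i ≤ L.length) :
    M <+: L.drop i ↔ (M.length ≤ L.length - i ∧
      ∀ t < M.length, L.getD (i + t) ' ' = M.getD t ' ') := by
  constructor
  · intro h
    have hlen : M.length ≤ (L.drop i).length := h.length_le
    rw [List.length_drop] at hlen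
    refine ⟨hlen, fun t ht => ?_⟩
    have h1 : i + t < L.length := by omega
    have h2 : t < M.length := ht
    rw [List.getD_eq_getElem L ' ' h1, List.getD_eq_getElem M ' ' h2]
    have := h.getElem h2
    rw [this]
    simp
  · rintro ⟨hlen, hall⟩
    rw [List.prefix_iff_eq_take]
    apply List.ext_getElem
    · simp; omega
    · intro t h1 h2
      have ht : t < M.length := h1
      have h3 : i + t < L.length := by omega
      have := hall t ht
      rw [List.getD_eq_getElem L ' ' h3, List.getD_eq_getElem M ' ' ht] at this
      simp [this.symm]

lemma pvWhileA_prefix (L M : List Char) (i : Nat) (hi : i < L.length) :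
    ((pvWhileA L M i 0 0).1 = M.length ↔ M <+: L.drop i) ∧
    ((pvWhileA L M i 0 0).1 = M.length → (pvWhileA L M i 0 0).2 = M.length) := by
  have hrun := pvWhileA_spec L M i 0 0 (Nat.zero_le _)
  set J := min M.length (L.length - i) with hJ
  rw [hrun]
  simp only [Nat.zero_add, Nat.sub_zero]
  rw [← List.range_eq_range']
  set pred := fun t => L.getD (i + t) ' ' == M.getD t ' ' with hpred
  have hcle : (List.range J).countP pred ≤ J := by
    have := List.countP_le_length (l := List.range J) (p := pred)
    simpa using this
  have hJm : J ≤ M.length := by omega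
  constructor
  · constructor
    · intro hc
      have hJe : J = M.length := by omega
      have hallmem := List.countP_eq_length.mp (by rw [hc, ← hJe]; simp)
      rw [pvPrefix_char L M i (by omega)]
      refine ⟨by omega, fun t ht => ?_⟩
      have := hallmem t (by simp [hJe]; omega)
      simpa [hpred] using this
    · intro h
      rw [pvPrefix_char L M i (by omega)] at h
      obtain ⟨hlen, hall⟩ := h
      have hJe : J = M.length := by omega
      rw [hJe]
      refine (List.countP_eq_length.mpr ?_).trans (by simp)
      intro t ht
      simp only [List.mem_range] at ht
      simpa [hpred] using hall t ht
  · intro hc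
    omega

lemma pvLoopA_step (L M A N : List Char) (hM : M ≠ []) (i : Nat) (hi : i < L.length) :
    pvLoopA L M A N i = (if pvOk L M A N i = true then true else pvLoopA L M A N (i + 1)) := by
  obtain ⟨hiff, h2⟩ := pvWhileA_prefix L M i hi
  rw [pvLoopA, dif_pos hi]
  by_cases hpre : M <+: L.drop i
  · have hc : (L.getD i ' ' == M.getD 0 ' ') = true := by
      have := (pvPrefix_char L M i (by omega)).mp hpre
      have h0 : 0 < M.length := List.length_pos_iff.mpr hM
      have := this.2 0 h0
      simpa using this
    rw [if_pos hc]
    have hp1 : (pvWhileA L M i 0 0).1 = M.length := hiff.mpr hpre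
    have hp2 : (pvWhileA L M i 0 0).2 = M.length := h2 hp1
    simp only [hp1, hp2, beq_self_eq_true, if_true]
    unfold pvOk
    rw [decide_eq_true hpre]
    simp only [Bool.true_and]
    by_cases hend : i + M.length = L.length
    · simp [hend]
    · rw [if_neg (by simpa using hend), decide_eq_false hend]
      simp only [Bool.false_or]
  · have hok : pvOk L M A N i = false := by
      unfold pvOk
      rw [decide_eq_false hpre]
      simp
    rw [hok]
    simp only [Bool.false_eq_true, if_false]
    by_cases hc : (L.getD i ' ' == M.getD 0 ' ') = true
    · rw [if_pos hc]
      have hp1 : (pvWhileA L M i 0 0).1 ≠ M.length := fun h => hpre (hiff.mp h)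
      rw [if_neg (by simpa using hp1)]
    · rw [if_neg hc]

lemma pvLoopA_iff (L M A N : List Char) (hM : M ≠ []) :
    ∀ i, pvLoopA L M A N i = true ↔ ∃ k, i ≤ k ∧ k < L.length ∧ pvOk L M A N k = true := by
  intro i
  induction hn : L.length - i generalizing i with
  | zero =>
    rw [pvLoopA, dif_neg (by omega)]
    constructor
    · simp
    · rintro ⟨k, hk1, hk2, -⟩; omega
  | succ d ih =>
    have hi : i < L.length := by omega
    rw [pvLoopA_step L M A N hM i hi]
    split_ifs with hok
    · constructor
      · intro _; exact ⟨i, le_refl _, hi, hok⟩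
      · intro _; rfl
    · rw [ih (i + 1) (by omega)]
      constructor
      · rintro ⟨k, h1, h2, h3⟩; exact ⟨k, by omega, h2, h3⟩
      · rintro ⟨k, h1, h2, h3⟩
        refine ⟨k, by_contra fun h => ?_, h2, h3⟩
        have : k = i := by omega
        rw [this] at h3
        exact hok h3

lemma pvOk_bound (L M A N : List Char) (hM : M ≠ []) (k : Nat)
    (h : pvOk L M A N k = true) : k + M.length ≤ L.length ∧ k < L.length := by
  unfold pvOk at h
  have hpre : M <+: L.drop k := by
    have := (Bool.and_eq_true _ _).mp h |>.1
    simpa using this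
  have hlen : M.length ≤ (L.drop k).length := hpre.length_le
  rw [List.length_drop] at hlen
  have hm : 0 < M.length := List.length_pos_iff.mpr hM
  omega

-- B's slice test at end position k+m equals "M matches at k"
lemma pvSlice_eq_prefix (L M : List Char) (k : Nat) (hk : k + M.length ≤ L.length) :
    PySem.List.slice L (some (((k + M.length : Nat) : Int) - (M.length : Int)))
        (some ((k + M.length : Nat) : Int)) = M ↔ M <+: L.drop k := by
  have h1 : ((k + M.length : Nat) : Int) - (M.length : Int) = ((k : Nat) : Int) := by
    push_cast; ring
  rw [h1, show ((k + M.length : Nat) : Int) = ((k : Nat) : Int) + ((M.length : Nat) : Int) by push_cast; ring,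
      PySem.List.slice_natCast_add]
  constructor
  · intro h
    exact h ▸ List.take_prefix _ _
  · intro h
    exact ((List.prefix_iff_eq_take).mp h).symm

lemma pvAlt_iff (s_maior s_menor alfabeto numero : String) (hM : s_menor.toList ≠ []) :
    verifica_perigo_alt s_maior s_menor alfabeto numero = true ↔
      ∃ k, k < s_maior.toList.length ∧
        pvOk s_maior.toList s_menor.toList alfabeto.toList numero.toList k = true := by
  unfold verifica_perigo_alt
  simp only []
  set L := s_maior.toList with hL
  set M := s_menor.toList with hMd
  set A := alfabeto.toList with hA
  set N := numero.toList with hN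
  have hm : 0 < M.length := List.length_pos_iff.mpr hM
  rw [List.any_eq_true]
  constructor
  · rintro ⟨p, hp, hpx⟩
    obtain ⟨hge, hsl⟩ := Bool.and_eq_true _ _ |>.mp hpx
    have hge' : (M.length : Int) ≤ p := of_decide_eq_true hge
    have hsl' : PySem.List.slice L (some (p - (M.length : Int))) (some p) = M :=
      of_decide_eq_true hsl
    -- p is either a boundary character position (< n) or n itself; in both cases p ≤ n
    rcases List.mem_append.mp hp with hmem | hend
    · obtain ⟨pc, hpc, hf⟩ := List.mem_filterMap.mp hmem
      obtain ⟨j, hj, hpc'⟩ := (PySem.List.mem_enumerate_iff _ _ _).mp hpc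
      by_cases hcond : (!(A.contains pc.2) && !(N.contains pc.2)) = true
      · rw [if_pos hcond] at hf
        have hp' : p = (j : Int) := by
          rw [hpc'] at hf; simpa using hf.symm
        subst hp'
        have hje : (j : Int) = ((j : Nat) : Int) := rfl
        set k := j - M.length with hk
        have hkm : k + M.length = j := by omega
        refine ⟨k, by omega, ?_⟩
        unfold pvOk
        have hpre : M <+: L.drop k := by
          have := (pvSlice_eq_prefix L M k (by omega))
          rw [hkm] at this
          exact this.mp (by exact_mod_cast hsl')
        rw [decide_eq_true hpre, Bool.true_and, hkm]
        have hc2 : pc.2 = L.getD j ' ' := by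
          rw [hpc', List.getD_eq_getElem L ' ' hj]
        rw [hc2] at hcond
        rw [hcond]
        simp
      · rw [if_neg hcond] at hf; exact absurd hf (by simp)
    · have hp' : p = (L.length : Int) := by simpa using hend
      subst hp'
      set k := L.length - M.length with hk
      have hkm : k + M.length = L.length := by omega
      refine ⟨k, by omega, ?_⟩
      unfold pvOk
      have hpre : M <+: L.drop k := by
        have := (pvSlice_eq_prefix L M k (by omega))
        rw [hkm] at this
        exact this.mp (by exact_mod_cast hsl')
      rw [decide_eq_true hpre, Bool.true_and, hkm]
      simp
  · rintro ⟨k, hk, hok⟩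
    have hb := pvOk_bound L M A N hM k hok
    unfold pvOk at hok
    obtain ⟨hpre', hafter⟩ := Bool.and_eq_true _ _ |>.mp hok
    have hpre : M <+: L.drop k := of_decide_eq_true hpre'
    refine ⟨((k + M.length : Nat) : Int), ?_, ?_⟩
    · rcases Bool.or_eq_true _ _ |>.mp hafter with hend | hmid
      · have : k + M.length = L.length := of_decide_eq_true hend
        rw [this]
        exact List.mem_append.mpr (Or.inr (by simp))
      · by_cases hend : k + M.length = L.length
        · rw [hend]; exact List.mem_append.mpr (Or.inr (by simp))
        · have hlt : k + M.length < L.length := by omega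
          refine List.mem_append.mpr (Or.inl (List.mem_filterMap.mpr
            ⟨(((k + M.length : Nat) : Int), L[k + M.length]), ?_, ?_⟩))
          · exact (PySem.List.mem_enumerate_iff _ _ _).mpr ⟨k + M.length, hlt, by simp⟩
          · have hg : L.getD (k + M.length) ' ' = L[k + M.length] :=
              List.getD_eq_getElem L ' ' hlt
            rw [if_pos (by rw [← hg]; exact hmid)]
    · rw [Bool.and_eq_true]
      constructor
      · exact decide_eq_true (by push_cast; omega)
      · exact decide_eq_true ((pvSlice_eq_prefix L M k hb.1).mpr hpre)

-- ===== VERDICT (by name: the statement is the Claim_ definition above) =====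
theorem verifica_perigo_spec : Claim_equal_verifica_perigo := by
  intro s_maior s_menor alfabeto numero _hD hP
  unfold Spec_verifica_perigo
  have hM : s_menor.toList ≠ [] := by
    intro h
    exact hP (by rwa [String.toList_eq_nil_iff] at h)
  have hA := pvLoopA_iff s_maior.toList s_menor.toList alfabeto.toList numero.toList hM 0
  have hB := pvAlt_iff s_maior s_menor alfabeto numero hM
  unfold verifica_perigo
  by_cases h : verifica_perigo_alt s_maior s_menor alfabeto numero = true
  · rw [h, hA]
    obtain ⟨k, hk, hok⟩ := hB.mp h
    exact ⟨k, Nat.zero_le _, hk, hok⟩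
  · have h' : verifica_perigo_alt s_maior s_menor alfabeto numero = false := by
      simpa using h
    rw [h']
    rw [Bool.eq_false_iff, Ne, hA]
    intro ⟨k, _, hk, hok⟩
    exact h (hB.mpr ⟨k, hk, hok⟩)
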